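-- pv_equiv track=rewrite | github.com/El-jefe77/CS-project-Y2 | classes.py | count_pairs_and_triplets
-- ===== SOURCE A (Python) =====
-- def count_pairs_and_triplets(ordered_values):
--
-- #---------------working code from .test
--     # Initialize a dictionary
--     element_count = {}
--
--     # Count how many times each value appears
--     for num in ordered_values:
--         if num in element_count:
--             element_count[num] += 1
--         else:
--             element_count[num] = 1
--
--     # Calculate the number of pairs
--     n_pairs = sum(count // 2 for count in element_count.values())
--
--     # Calculate the number of triplets
--     total_triplets = sum(count // 3 for count in element_count.values())
--
--     return n_pairs, total_triplets
-- ===== SOURCE B (Python) =====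
-- def count_pairs_and_triplets(ordered_values):
--     # Single pass: maintain running pair/triplet totals while counting,
--     # instead of counting first and aggregating in two later passes.
--     element_count = {}
--     n_pairs = 0
--     total_triplets = 0
--     for num in ordered_values:
--         c = element_count.get(num, 0) + 1
--         element_count[num] = c
--         if c % 2 == 0:
--             n_pairs += 1
--         if c % 3 == 0:
--             total_triplets += 1
--     return n_pairs, total_triplets
-- ===== Notes on version B (the rewrite author's own statement) =====
-- stated objective: alternative
-- what changed: single fused pass that updates running pair/triplet totals as each element's count crosses a multiple of 2 or 3, replacing A's count-then-two-aggregation-passes over the dict values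
import Mathlib
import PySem

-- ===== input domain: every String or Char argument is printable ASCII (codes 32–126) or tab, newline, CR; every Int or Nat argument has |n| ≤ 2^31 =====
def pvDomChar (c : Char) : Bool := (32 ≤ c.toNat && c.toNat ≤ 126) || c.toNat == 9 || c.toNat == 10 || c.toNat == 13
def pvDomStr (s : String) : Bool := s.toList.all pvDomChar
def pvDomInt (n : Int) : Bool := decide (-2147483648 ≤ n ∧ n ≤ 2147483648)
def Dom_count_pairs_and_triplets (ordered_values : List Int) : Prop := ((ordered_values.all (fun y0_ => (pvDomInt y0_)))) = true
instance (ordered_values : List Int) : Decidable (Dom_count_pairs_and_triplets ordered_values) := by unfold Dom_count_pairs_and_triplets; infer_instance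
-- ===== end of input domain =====

-- B fuses A's two aggregation passes into the counting loop (running pair/triplet totals); alternative decomposition, same cost.

-- ===== PORT A =====
def count_pairs_and_triplets (ordered_values : List Int) : Int × Int :=
  -- element_count = {}; for num in ordered_values: if num in element_count: +=1 else: =1
  let element_count : PySem.Dict Int Int :=
    ordered_values.foldl
      (fun d num =>
        if d.contains num then d.insert num (d.getD num 0 + 1)
        else d.insert num 1)
      PySem.Dict.empty
  -- n_pairs = sum(count // 2 for count in element_count.values())
  let n_pairs : Int := (element_count.values.map (fun count => PySem.Int.floordiv count 2)).sum
  -- total_triplets = sum(count // 3 for count in element_count.values())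
  let total_triplets : Int := (element_count.values.map (fun count => PySem.Int.floordiv count 3)).sum
  (n_pairs, total_triplets)

-- ===== PORT B =====
def count_pairs_and_triplets_alt (ordered_values : List Int) : Int × Int :=
  -- single pass: state = (element_count, n_pairs, total_triplets)
  let st :=
    ordered_values.foldl
      (fun (st : PySem.Dict Int Int × Int × Int) num =>
        let c := st.1.getD num 0 + 1
        (st.1.insert num c,
         st.2.1 + (if PySem.Int.mod c 2 = 0 then 1 else 0),
         st.2.2 + (if PySem.Int.mod c 3 = 0 then 1 else 0)))
      (PySem.Dict.empty, 0, 0)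
  (st.2.1, st.2.2)

-- ===== PRECONDITION & SPEC =====
def Spec_count_pairs_and_triplets (ordered_values : List Int) (out : Int × Int) : Prop := out = count_pairs_and_triplets_alt ordered_values
instance (ordered_values : List Int) (out : Int × Int) : Decidable (Spec_count_pairs_and_triplets ordered_values out) := by unfold Spec_count_pairs_and_triplets; infer_instance

-- ===== CLAIM (what is proved, stated in full; the proofs are below) =====
def Claim_equal_count_pairs_and_triplets : Prop := ∀ (ordered_values : List Int), Dom_count_pairs_and_triplets ordered_values → Spec_count_pairs_and_triplets ordered_values (count_pairs_and_triplets ordered_values)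

-- ===== LEMMAS AND PROOFS =====

-- A's counting branch is exactly the insert-getD counting step (in the else-branch getD is 0)
theorem astep_eq_counter_step (ordered_values : List Int) :
    ordered_values.foldl
      (fun (d : PySem.Dict Int Int) num =>
        if d.contains num then d.insert num (d.getD num 0 + 1)
        else d.insert num 1)
      PySem.Dict.empty
    = PySem.Dict.counter ordered_values := by
  rw [← PySem.Dict.foldl_insert_getD_add_one_eq_counter]
  congr 1
  funext d num
  by_cases h : d.contains num = true
  · simp [h]
  · simp only [Bool.not_eq_true] at h
    simp [h, PySem.Dict.getD_of_not_contains d (0:Int) h]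

-- the // m sum over the counter's values, as a function of the raw list
def divSum (m : Int) (l : List Int) : Int :=
  (((PySem.Set.ofList l).map (fun k => PySem.Int.floordiv (l.count k : Int) m))).sum

theorem a_values_sum (m : Int) (l : List Int) :
    ((PySem.Dict.counter l).values.map (fun c => PySem.Int.floordiv c m)).sum = divSum m l := by
  simp [divSum, PySem.Dict.values, PySem.Dict.items_counter, List.map_map, Function.comp_def]

-- changing f to g at the single occurrence of x in a Nodup list shifts the sum by f x - g x
theorem sum_map_change (S : List Int) (f g : Int → Int) (x : Int)
    (hS : S.Nodup) (hx : x ∈ S) (hfg : ∀ k ∈ S, k ≠ x → f k = g k) :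
    (S.map f).sum = (S.map g).sum + (f x - g x) := by
  induction S with
  | nil => cases hx
  | cons a S ih =>
    rcases List.mem_cons.mp hx with rfl | hx'
    · have hnotin : x ∉ S := (List.nodup_cons.mp hS).1
      have : S.map f = S.map g := by
        apply List.map_congr_left
        intro k hk
        exact hfg k (List.mem_cons_of_mem _ hk) (fun h => hnotin (h ▸ hk))
      simp [this]; ring
    · have ha : a ≠ x := fun h => ((List.nodup_cons.mp hS).1) (h ▸ hx')
      have := ih (List.nodup_cons.mp hS).2 hx'
        (fun k hk => hfg k (List.mem_cons_of_mem _ hk))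
      simp only [List.map_cons, List.sum_cons, this, hfg a (List.mem_cons_self) ha]
      ring

theorem floordiv_succ_two (n : Nat) :
    PySem.Int.floordiv ((n : Int) + 1) 2
      = PySem.Int.floordiv (n : Int) 2 + (if PySem.Int.mod ((n : Int) + 1) 2 = 0 then 1 else 0) := by
  simp only [PySem.Int.floordiv_eq_ediv_of_pos (by norm_num : (0:Int) < 2),
      PySem.Int.mod_eq_emod_of_pos (by norm_num : (0:Int) < 2)]
  split_ifs with h <;> omega

theorem floordiv_succ_three (n : Nat) :
    PySem.Int.floordiv ((n : Int) + 1) 3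
      = PySem.Int.floordiv (n : Int) 3 + (if PySem.Int.mod ((n : Int) + 1) 3 = 0 then 1 else 0) := by
  simp only [PySem.Int.floordiv_eq_ediv_of_pos (by norm_num : (0:Int) < 3),
      PySem.Int.mod_eq_emod_of_pos (by norm_num : (0:Int) < 3)]
  split_ifs with h <;> omega

theorem floordiv_zero_succ (m : Int) (hm : 1 < m) : PySem.Int.floordiv 1 m = 0 := by
  rw [PySem.Int.floordiv_eq_ediv_of_pos (by omega : (0:Int) < m)]
  exact Int.ediv_eq_zero_of_lt (by norm_num) hm

-- appending one element moves divSum by the 0/1 step B adds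
theorem divSum_append (m : Int) (hm : 1 < m)
    (hstep : ∀ n : Nat, PySem.Int.floordiv ((n : Int) + 1) m
      = PySem.Int.floordiv (n : Int) m + (if PySem.Int.mod ((n : Int) + 1) m = 0 then 1 else 0))
    (l : List Int) (x : Int) :
    divSum m (l ++ [x])
      = divSum m l + (if PySem.Int.mod ((l.count x : Int) + 1) m = 0 then 1 else 0) := by
  unfold divSum
  rw [PySem.Set.ofList_append_singleton]
  have hcount : ∀ k : Int, (l ++ [x]).count k = l.count k + (if k = x then 1 else 0) := by
    intro k
    by_cases h : k = x
    · subst h; simp [List.count_append]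
    · have h' : x ≠ k := Ne.symm h
      simp [List.count_append, h, h']
  by_cases hx : x ∈ l
  · have hxS : x ∈ PySem.Set.ofList l := by
      rw [PySem.Set.mem_ofList]; exact hx
    rw [PySem.Set.add_of_mem hxS]
    rw [sum_map_change (PySem.Set.ofList l)
        (fun k => PySem.Int.floordiv ((l ++ [x]).count k : Int) m)
        (fun k => PySem.Int.floordiv ((l.count k) : Int) m) x
        (PySem.Set.nodup_ofList l) hxS
        (by intro k _ hk; simp [hcount k, hk])]
    have : ((l ++ [x]).count x : Int) = (l.count x : Int) + 1 := by
      simp [hcount x]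
    rw [this, hstep (l.count x)]
    ring
  · have hxS : x ∉ PySem.Set.ofList l := by
      rw [PySem.Set.mem_ofList]; exact hx
    rw [PySem.Set.add_of_not_mem hxS]
    have hmap : (PySem.Set.ofList l).map (fun k => PySem.Int.floordiv ((l ++ [x]).count k : Int) m)
        = (PySem.Set.ofList l).map (fun k => PySem.Int.floordiv ((l.count k) : Int) m) := by
      apply List.map_congr_left
      intro k hk
      have : k ≠ x := fun h => hxS (h ▸ hk)
      simp [hcount k, this]
    have hcx : l.count x = 0 := List.count_eq_zero.mpr hx
    have h1 : ((l ++ [x]).count x : Int) = 1 := by simp [hcount x, hcx]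
    have hm1 : PySem.Int.mod ((l.count x : Int) + 1) m = 1 := by
      rw [hcx, show (((0:Nat):Int) + 1) = 1 by norm_num,
          PySem.Int.mod_eq_emod_of_pos (by omega : (0:Int) < m)]
      exact Int.emod_eq_of_lt (by norm_num) hm
    rw [List.map_append, List.sum_append, hmap, hm1]
    simp only [List.map_singleton, List.sum_cons, List.sum_nil, h1]
    rw [floordiv_zero_succ m hm]
    norm_num

-- B's fold state is (counter of the processed prefix, running divSum 2, running divSum 3)
theorem b_fold_invariant (l : List Int) :
    l.foldl
      (fun (st : PySem.Dict Int Int × Int × Int) num =>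
        let c := st.1.getD num 0 + 1
        (st.1.insert num c,
         st.2.1 + (if PySem.Int.mod c 2 = 0 then 1 else 0),
         st.2.2 + (if PySem.Int.mod c 3 = 0 then 1 else 0)))
      (PySem.Dict.empty, 0, 0)
    = (PySem.Dict.counter l, divSum 2 l, divSum 3 l) := by
  induction l using List.reverseRecOn with
  | nil => simp [divSum, PySem.Set.ofList_nil, PySem.Dict.counter]
  | append_singleton l x ih =>
    rw [List.foldl_append, ih]
    simp only [List.foldl_cons, List.foldl_nil]
    have hc : (PySem.Dict.counter l).getD x 0 = (l.count x : Int) := PySem.Dict.getD_counter l x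
    refine Prod.ext ?_ (Prod.ext ?_ ?_)
    · show (PySem.Dict.counter l).insert x ((PySem.Dict.counter l).getD x 0 + 1)
          = PySem.Dict.counter (l ++ [x])
      rw [← PySem.Dict.foldl_insert_getD_add_one_eq_counter,
          ← PySem.Dict.foldl_insert_getD_add_one_eq_counter, List.foldl_append]
      simp
    · show divSum 2 l + _ = divSum 2 (l ++ [x])
      rw [divSum_append 2 (by norm_num) floordiv_succ_two l x, hc]
    · show divSum 3 l + _ = divSum 3 (l ++ [x])
      rw [divSum_append 3 (by norm_num) floordiv_succ_three l x, hc]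

-- ===== VERDICT (by name: the statement is the Claim_ definition above) =====
theorem count_pairs_and_triplets_spec : Claim_equal_count_pairs_and_triplets := by
  intro ordered_values _
  show count_pairs_and_triplets ordered_values = count_pairs_and_triplets_alt ordered_values
  simp only [count_pairs_and_triplets, count_pairs_and_triplets_alt]
  rw [astep_eq_counter_step, b_fold_invariant]
  exact Prod.ext (a_values_sum 2 ordered_values) (a_values_sum 3 ordered_values)
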